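-- pv_equiv track=rewrite | github.com/PurestEarth/EasyFaiss | utils/cluster_utils.py | get_cluster_names
-- ===== SOURCE A (Python) =====
-- from collections import Counter
-- from typing import List, Dict, Any
--
-- def get_cluster_names(clusters: List[Any], sentences: List[str],
--                       n_words: int = 2) -> Dict[str, List[Any]]:
--     """Given list of clusters and corresponding sentences a
--     name is assigned to each cluster. Name is picked from
--     most frequent words (n_words)
--     Args:
--         clusters (List[Any]): Clusters
--         sentences (List[str]): Sentences
--         n_words (int, optional): How many words should be picked as name.
--         Defaults to 5.
--
--     Returns:
--         Dict[Any, str]: cluster to name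
--     """
--     assert len(clusters) == len(sentences)
--     cluster_to_name, cluster_to_list = {}, {}
--     for cluster, sentence in zip(clusters, sentences):
--         if cluster in cluster_to_list:
--             cluster_to_list[cluster].extend(sentence.lower().split())
--         else:
--             cluster_to_list[cluster] = sentence.lower().split()
--     used_words = []
--     for cluster, array in cluster_to_list.items():
--         filtered_array = [x for x in array if x not in used_words]
--         top_words = list(map(lambda x: x[0], Counter(
--             filtered_array).most_common(n_words)))
--         cluster_to_name[cluster] = '_'.join(top_words)
--         used_words.extend(top_words)
--     return cluster_to_name
-- ===== SOURCE B (Python) =====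
-- from typing import List, Dict, Any
--
--
-- def get_cluster_names(clusters: List[Any], sentences: List[str],
--                       n_words: int = 2) -> Dict[str, List[Any]]:
--     """Dict-free single-loop version: walk the clusters in order, and for each
--     cluster not yet named, gather its words by scanning the pairs, collect the
--     distinct unused words, and pick the top ones by repeated max-extraction
--     (selection) instead of building Counters and sorting them."""
--     assert len(clusters) == len(sentences)
--     names = {}
--     used_words = []
--     for cluster in clusters:
--         if cluster in names:
--             continue
--         words = []
--         for c, s in zip(clusters, sentences):
--             if c == cluster:
--                 words += s.lower().split()
--         candidates = []
--         for w in words: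
--             if w not in candidates and w not in used_words:
--                 candidates.append(w)
--         top = []
--         while candidates and len(top) < n_words:
--             best = max(candidates, key=words.count)
--             top.append(best)
--             candidates.remove(best)
--         names[cluster] = '_'.join(top)
--         used_words += top
--     return names
-- ===== Notes on version B (the rewrite author's own statement) =====
-- stated objective: alternative
-- what changed: B drops the grouping dict and the Counters entirely: one loop over clusters skips already-named ones, gathers each cluster's words by rescanning the zipped pairs, builds the distinct-unused candidate list directly, and picks the name's words by repeated max-extraction (selection) instead of counting into Counters and taking most_common of a sorted table; this trades speed on many-cluster inputs for a flat, data-structure-free formulation.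
import Mathlib
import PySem

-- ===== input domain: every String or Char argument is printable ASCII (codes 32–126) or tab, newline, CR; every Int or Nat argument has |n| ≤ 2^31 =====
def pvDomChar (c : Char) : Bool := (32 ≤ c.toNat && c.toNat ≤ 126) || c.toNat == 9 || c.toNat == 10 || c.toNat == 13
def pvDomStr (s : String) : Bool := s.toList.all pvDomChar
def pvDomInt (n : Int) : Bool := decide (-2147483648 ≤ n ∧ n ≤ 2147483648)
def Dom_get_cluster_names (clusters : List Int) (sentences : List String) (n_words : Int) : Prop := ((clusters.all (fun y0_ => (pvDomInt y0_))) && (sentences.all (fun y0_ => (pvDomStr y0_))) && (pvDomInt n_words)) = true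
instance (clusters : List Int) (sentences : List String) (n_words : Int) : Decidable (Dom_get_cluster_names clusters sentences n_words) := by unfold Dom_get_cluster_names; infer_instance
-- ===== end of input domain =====

-- B is dict-free: one loop over the clusters that skips already-named ones, gathers each
-- cluster's words by rescanning the pairs, and names it by repeated max-extraction over
-- the distinct unused words instead of Counter grouping + most_common; return-value
-- equivalence only (neither program mutates its arguments).

-- sentence.lower().split()  (shared: both Pythons call exactly this)
def pvWords (s : String) : List String := PySem.Str.split₀ (PySem.Str.lower s)

-- ===== PORT A =====
-- Counter.most_common(n) over an items list: stable sort by count descending, first n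
def pvMostCommon (items : List (String × Int)) (n : Int) : List (String × Int) :=
  (PySem.List.sorted items (fun p => p.2) true).take n.toNat

-- grouping step: extend the cluster's word list (or start it)
def pvGroupStepA (d : PySem.Dict Int (List String)) (cs : Int × String) : PySem.Dict Int (List String) :=
  if d.contains cs.1 then d.modify cs.1 [] (· ++ pvWords cs.2) else d.insert cs.1 (pvWords cs.2)

-- naming step: rebuild the filtered word list, count it, take the top words
def pvNameStepA (n : Int) (st : PySem.Dict Int String × List String) (ca : Int × List String) :
    PySem.Dict Int String × List String :=
  let filtered := ca.2.filter (fun x => !(st.2.contains x))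
  let top := (pvMostCommon (PySem.Dict.counter filtered).items n).map (·.1)
  (st.1.insert ca.1 (PySem.Str.join "_" top), st.2 ++ top)

def get_cluster_names (clusters : List Int) (sentences : List String) (n_words : Int) : List (Int × String) :=
  let ctl := (clusters.zip sentences).foldl pvGroupStepA PySem.Dict.empty
  (ctl.items.foldl (pvNameStepA n_words) (PySem.Dict.empty, [])).1.items

-- ===== PORT B =====
-- words.count(w), as Python's int
def pvCount (words : List String) (w : String) : Int := (PySem.List.count words w : Int)

-- 'while candidates and len(top) < n_words: best = max(candidates, key=words.count);
--  top.append(best); candidates.remove(best)'  — built back-to-front by the recursion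
def pvSelect (words : List String) (cand : List String) (k : Int) : List String :=
  if cand = [] ∨ k ≤ 0 then []
  else
    match hm : PySem.List.max? cand (fun w => pvCount words w) with
    | none => []
    | some m => m :: pvSelect words (cand.erase m) (k - 1)
termination_by cand.length
decreasing_by
  have hmem := PySem.List.max?_mem hm
  have := List.length_erase_of_mem hmem
  have hpos : 0 < cand.length := List.length_pos_of_mem hmem
  omega

-- the body of B's loop over clusters ('continue' = the contains test)
def pvStepB (clusters : List Int) (sentences : List String) (n_words : Int)
    (st : PySem.Dict Int String × List String) (cluster : Int) :
    PySem.Dict Int String × List String :=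
  if st.1.contains cluster then st
  else
    let words := (clusters.zip sentences).foldl
      (fun ws p => if p.1 == cluster then ws ++ pvWords p.2 else ws) []
    let cand := words.foldl
      (fun acc w => if !(acc.contains w) && !(st.2.contains w) then acc ++ [w] else acc) []
    let top := pvSelect words cand n_words
    (st.1.insert cluster (PySem.Str.join "_" top), st.2 ++ top)

def get_cluster_names_alt (clusters : List Int) (sentences : List String) (n_words : Int) : List (Int × String) :=
  (clusters.foldl (pvStepB clusters sentences n_words) (PySem.Dict.empty, [])).1.items

-- ===== PRECONDITION & SPEC =====
-- A asserts len(clusters) == len(sentences); Pre_ excludes exactly the AssertionError inputs.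
def Pre_get_cluster_names (clusters : List Int) (sentences : List String) (n_words : Int) : Prop :=
  clusters.length = sentences.length
instance (clusters : List Int) (sentences : List String) (n_words : Int) : Decidable (Pre_get_cluster_names clusters sentences n_words) := by unfold Pre_get_cluster_names; infer_instance
def pvWitness_get_cluster_names : List Int × List String × Int := ([1, 1, 2], ["big cat", "big dog", "big fish"], 2)

def Spec_get_cluster_names (clusters : List Int) (sentences : List String) (n_words : Int) (out : List (Int × String)) : Prop := out = get_cluster_names_alt clusters sentences n_words
instance (clusters : List Int) (sentences : List String) (n_words : Int) (out : List (Int × String)) : Decidable (Spec_get_cluster_names clusters sentences n_words out) := by unfold Spec_get_cluster_names; infer_instance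

-- ===== CLAIM (what is proved, stated in full; the proofs are below) =====
def Claim_equal_get_cluster_names : Prop := ∀ (clusters : List Int) (sentences : List String) (n_words : Int), Dom_get_cluster_names clusters sentences n_words → Pre_get_cluster_names clusters sentences n_words → Spec_get_cluster_names clusters sentences n_words (get_cluster_names clusters sentences n_words)

-- ===== LEMMAS AND PROOFS =====

-- insertion sort, one element appended on the right
lemma pvSorted_snoc {α κ : Type} [LinearOrder κ] (l : List α) (x : α) (key : α → κ) :
    PySem.List.sorted (l ++ [x]) key true
      = PySem.List.insertBy (fun a b => decide (key b < key a)) x (PySem.List.sorted l key true) := by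
  rw [PySem.List.sorted_rev_eq_foldl_insertBy, PySem.List.sorted_rev_eq_foldl_insertBy,
      List.foldl_append]
  rfl

-- max? of a snoc
lemma pvMax?_snoc {α κ : Type} [LinearOrder κ] (l : List α) (x : α) (key : α → κ) :
    PySem.List.max? (l ++ [x]) key
      = match PySem.List.max? l key with
        | none => some x
        | some m => if key m < key x then some x else some m := by
  cases hl : PySem.List.max? l key with
  | none =>
    have : l = [] := (PySem.List.max?_eq_none_iff l key).mp hl
    subst this
    rfl
  | some m =>
    unfold PySem.List.max? at hl ⊢
    rw [List.foldl_append, hl]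
    rfl

-- insertBy only looks at comparisons with list members
lemma pvInsertBy_congr {α : Type} (bf bg : α → α → Bool) (x : α) (ys : List α)
    (h : ∀ y ∈ ys, bf x y = bg x y) :
    PySem.List.insertBy bf x ys = PySem.List.insertBy bg x ys := by
  induction ys with
  | nil => rfl
  | cons y ys ih =>
    have hy : bf x y = bg x y := h y (by simp)
    show (if bf x y then x :: y :: ys else y :: PySem.List.insertBy bf x ys)
        = (if bg x y then x :: y :: ys else y :: PySem.List.insertBy bg x ys)
    rw [hy, ih (fun z hz => h z (by simp [hz]))]

-- sorted only looks at keys of members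
lemma pvSorted_congr {α κ : Type} [LinearOrder κ] (l : List α) (f g : α → κ)
    (h : ∀ y ∈ l, f y = g y) :
    PySem.List.sorted l f true = PySem.List.sorted l g true := by
  induction l using List.reverseRecOn with
  | nil => rfl
  | append_singleton l x ih =>
    rw [pvSorted_snoc, pvSorted_snoc, ih (fun y hy => h y (by simp [hy]))]
    exact pvInsertBy_congr _ _ x _ (fun y hy => by
      have hy' : y ∈ l := (PySem.List.mem_sorted l g true y).mp hy
      rw [h x (by simp), h y (by simp [hy'])])

-- insertBy commutes with map when the comparison factors through the map
lemma pvInsertBy_map {α β : Type} (before : β → β → Bool) (g : α → β) (x : α) (ys : List α) :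
    PySem.List.insertBy before (g x) (ys.map g)
      = (PySem.List.insertBy (fun a b => before (g a) (g b)) x ys).map g := by
  induction ys with
  | nil => rfl
  | cons y ys ih =>
    show (if before (g x) (g y) then g x :: g y :: ys.map g
          else g y :: PySem.List.insertBy before (g x) (ys.map g))
        = ((if before (g x) (g y) then x :: y :: ys
            else y :: PySem.List.insertBy (fun a b => before (g a) (g b)) x ys).map g)
    by_cases hb : before (g x) (g y) = true
    · simp [hb]
    · simp only [Bool.not_eq_true] at hb
      simp [hb, ih]

-- sorted commutes with map when the key factors through the map
lemma pvSorted_map {α β κ : Type} [LinearOrder κ] (l : List α) (g : α → β) (key : β → κ) :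
    PySem.List.sorted (l.map g) key true
      = (PySem.List.sorted l (fun a => key (g a)) true).map g := by
  induction l using List.reverseRecOn with
  | nil => rfl
  | append_singleton l x ih =>
    rw [List.map_append, List.map_singleton, pvSorted_snoc, pvSorted_snoc, ih,
        pvInsertBy_map]

-- head of a stable descending sort is the FIRST maximal element, tail sorts the rest
lemma pvSorted_head {α κ : Type} [LinearOrder κ] [BEq α] [LawfulBEq α]
    (l : List α) (key : α → κ) (m : α)
    (hnd : l.Nodup) (hm : PySem.List.max? l key = some m) :
    PySem.List.sorted l key true = m :: PySem.List.sorted (l.erase m) key true := by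
  induction l using List.reverseRecOn generalizing m with
  | nil => simp [PySem.List.max?] at hm
  | append_singleton l x ih =>
    rw [pvMax?_snoc] at hm
    have hndl : l.Nodup := hnd.sublist (List.sublist_append_left l [x])
    have hxl : x ∉ l := by
      have := List.nodup_append.mp hnd
      intro hx; exact this.2.2 x hx x (by simp) rfl
    cases hl : PySem.List.max? l key with
    | none =>
      have : l = [] := (PySem.List.max?_eq_none_iff l key).mp hl
      subst this
      rw [hl] at hm
      simp only at hm
      cases hm
      simp
      rfl
    | some m0 =>
      rw [hl] at hm
      simp only at hm
      have hm0l : m0 ∈ l := PySem.List.max?_mem hl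
      by_cases hc : key m0 < key x
      · rw [if_pos hc] at hm
        cases hm
        rw [pvSorted_snoc, ih m0 hndl hl]
        show (if decide (key m0 < key x) = true then x :: m0 :: _ else _) = _
        rw [if_pos (by simpa using hc), List.erase_append_right _ hxl]
        simp [ih m0 hndl hl]
      · rw [if_neg hc] at hm
        cases hm
        rw [pvSorted_snoc, ih m hndl hl]
        show (if decide (key m < key x) = true then _
              else m :: PySem.List.insertBy _ x (PySem.List.sorted (l.erase m) key true)) = _
        rw [if_neg (by simpa using hc), List.erase_append_left _ hm0l, pvSorted_snoc]

-- repeated max-extraction = take of the stable descending sort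
lemma pvSelect_eq_take (words : List String) (cand : List String) (k : Int)
    (hnd : cand.Nodup) :
    pvSelect words cand k
      = (PySem.List.sorted cand (fun w => pvCount words w) true).take k.toNat := by
  have main : ∀ (N : ℕ) (cand : List String) (k : Int), cand.length ≤ N → cand.Nodup →
      pvSelect words cand k
        = (PySem.List.sorted cand (fun w => pvCount words w) true).take k.toNat := by
    intro N
    induction N with
    | zero =>
      intro cand k hlen _
      have hc : cand = [] := List.eq_nil_of_length_eq_zero (Nat.le_zero.mp hlen)
      subst hc
      rw [pvSelect]
      simp
      exact Or.inr rfl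
    | succ N ih =>
      intro cand k hlen hnd
      rw [pvSelect]
      by_cases h : cand = [] ∨ k ≤ 0
      · rw [if_pos h]
        rcases h with h | h
        · subst h
          simp
          exact Or.inr rfl
        · rw [Int.toNat_of_nonpos h]
          simp
      · rw [if_neg h]
        obtain ⟨h1, h2⟩ := not_or.mp h
        cases hmax : PySem.List.max? cand (fun w => pvCount words w) with
        | none => exact absurd ((PySem.List.max?_eq_none_iff _ _).mp hmax) h1
        | some m =>
          dsimp only
          have hmem := PySem.List.max?_mem hmax
          rw [pvSorted_head cand _ m hnd hmax]
          have hk : k.toNat = (k - 1).toNat + 1 := by omega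
          rw [hk, List.take_succ_cons]
          have hlen' : (cand.erase m).length ≤ N := by
            have := List.length_erase_of_mem hmem
            have := List.length_pos_of_mem hmem
            omega
          rw [ih (cand.erase m) (k - 1) hlen' (hnd.erase m)]
  exact main cand.length cand k le_rfl hnd

-- B's candidate loop builds set(filter-unused) over any starting set
lemma pvCand_fold (U : List String) (words : List String) (a : List String) :
    words.foldl
      (fun acc w => if !(acc.contains w) && !(U.contains w) then acc ++ [w] else acc) a
      = PySem.Set.update a (words.filter (fun w => !(U.contains w))) := by
  induction words generalizing a with
  | nil => rfl
  | cons w ws ih =>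
    simp only [List.foldl_cons, List.filter_cons]
    by_cases hu : U.contains w = true
    · simp only [hu, Bool.not_true, Bool.and_false, if_false, Bool.false_eq_true]
      rw [ih]
    · simp only [Bool.not_eq_true] at hu
      simp only [hu, Bool.not_false, Bool.and_true, if_true]
      rw [ih]
      have hstep : (if !(a.contains w) then a ++ [w] else a) = PySem.Set.add a w := by
        cases h : a.contains w <;> simp [PySem.Set.add, PySem.Set.contains] <;> simpa using h
      rw [hstep]
      rfl

-- first occurrences of xs that are not yet in S, in order
def pvNew (S : List Int) : List Int → List Int
  | [] => []
  | x :: xs => if x ∈ S then pvNew S xs else x :: pvNew (S ++ [x]) xs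

lemma pvSet_update_eq_append_pvNew (xs : List Int) (S : List Int) :
    PySem.Set.update S xs = S ++ pvNew S xs := by
  induction xs generalizing S with
  | nil => simp [PySem.Set.update, pvNew]
  | cons x xs ih =>
    show PySem.Set.update (PySem.Set.add S x) xs = _
    rw [PySem.Set.add_eq_ite]
    by_cases hx : x ∈ S
    · rw [if_pos hx, ih S]
      simp [pvNew, hx]
    · rw [if_neg hx, ih (S ++ [x])]
      simp [pvNew, hx]

-- A's grouping step is a single dict.modify
lemma pvGroupA_eq_modify (d : PySem.Dict Int (List String)) (p : Int × String) :
    pvGroupStepA d p = d.modify p.1 [] (· ++ pvWords p.2) := by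
  unfold pvGroupStepA
  by_cases h : d.contains p.1 = true
  · rw [if_pos h]
  · simp only [Bool.not_eq_true] at h
    rw [if_neg (by simp [h])]
    show _ = d.insert p.1 (d.getD p.1 [] ++ pvWords p.2)
    rw [PySem.Dict.getD_of_not_contains d [] h]
    rfl

-- lookup in the grouped dict: the concatenated words of the matching pairs
lemma pvGroup_getD (pairs : List (Int × String)) (d : PySem.Dict Int (List String)) (c : Int) :
    (pairs.foldl (fun d p => d.modify p.1 [] (· ++ pvWords p.2)) d).getD c []
      = d.getD c [] ++ (pairs.filter (fun p => p.1 == c)).flatMap (fun p => pvWords p.2) := by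
  induction pairs generalizing d with
  | nil => simp
  | cons p ps ih =>
    simp only [List.foldl_cons, List.filter_cons]
    rw [ih]
    show (d.insert p.1 (d.getD p.1 [] ++ pvWords p.2)).getD c [] ++ _ = _
    rw [PySem.Dict.getD_insert]
    by_cases hc : p.1 = c
    · subst hc
      rw [if_pos rfl]
      simp
    · rw [if_neg (fun h => hc h.symm)]
      have : (p.1 == c) = false := by simp [hc]
      simp [this]

-- B's skip-loop over all clusters = plain loop over the not-yet-seen first occurrences
lemma pvSkip_fold (clusters : List Int) (sentences : List String) (n : Int)
    (xs : List Int) (S : List Int) (st : PySem.Dict Int String × List String)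
    (hinv : ∀ c : Int, st.1.contains c = decide (c ∈ S)) :
    xs.foldl (pvStepB clusters sentences n) st
      = (pvNew S xs).foldl
          (fun st cluster =>
            let words := (clusters.zip sentences).foldl
              (fun ws p => if p.1 == cluster then ws ++ pvWords p.2 else ws) []
            let cand := words.foldl
              (fun acc w => if !(acc.contains w) && !(st.2.contains w) then acc ++ [w] else acc) []
            let top := pvSelect words cand n
            (st.1.insert cluster (PySem.Str.join "_" top), st.2 ++ top)) st := by
  induction xs generalizing st S with
  | nil => rfl
  | cons x xs ih =>
    simp only [List.foldl_cons]
    by_cases hx : x ∈ S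
    · have hcx : st.1.contains x = true := by rw [hinv x]; simp [hx]
      have h1 : pvStepB clusters sentences n st x = st := by
        simp [pvStepB, hcx]
      have h2 : pvNew S (x :: xs) = pvNew S xs := by simp [pvNew, hx]
      rw [h1, h2]
      exact ih S st hinv
    · have hcx : st.1.contains x = false := by rw [hinv x]; simp [hx]
      have h2 : pvNew S (x :: xs) = x :: pvNew (S ++ [x]) xs := by simp [pvNew, hx]
      rw [h2]
      simp only [List.foldl_cons]
      have h1 : pvStepB clusters sentences n st x
          = (let words := (clusters.zip sentences).foldl
               (fun ws p => if p.1 == x then ws ++ pvWords p.2 else ws) []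
             let cand := words.foldl
               (fun acc w => if !(acc.contains w) && !(st.2.contains w) then acc ++ [w] else acc) []
             let top := pvSelect words cand n
             (st.1.insert x (PySem.Str.join "_" top), st.2 ++ top)) := by
        simp [pvStepB, hcx]
      rw [h1]
      refine ih (S ++ [x]) _ ?_
      intro c
      dsimp only
      rw [PySem.Dict.contains_insert, hinv c]
      by_cases hc : c = x
      · simp [hc]
      · simp [hc, List.mem_append]

-- the two per-cluster bodies agree
lemma pvBody_eq (clusters : List Int) (sentences : List String) (n : Int)
    (st : PySem.Dict Int String × List String) (c : Int) :
    (let words := (clusters.zip sentences).foldl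
        (fun ws p => if p.1 == c then ws ++ pvWords p.2 else ws) []
     let cand := words.foldl
        (fun acc w => if !(acc.contains w) && !(st.2.contains w) then acc ++ [w] else acc) []
     let top := pvSelect words cand n
     ((st.1.insert c (PySem.Str.join "_" top), st.2 ++ top) :
        PySem.Dict Int String × List String))
      = pvNameStepA n st
          (c, ((clusters.zip sentences).filter (fun p => p.1 == c)).flatMap (fun p => pvWords p.2)) := by
  dsimp only
  rw [PySem.List.foldl_if_eq_foldl_filter (p := fun p : Int × String => p.1 == c)
        (f := fun ws p => ws ++ pvWords p.2),
      PySem.List.foldl_append_eq_flatMap, List.nil_append]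
  set arr := ((clusters.zip sentences).filter (fun p => p.1 == c)).flatMap
      (fun p => pvWords p.2) with harr
  rw [pvCand_fold st.2 arr []]
  unfold pvNameStepA
  dsimp only
  set F := arr.filter (fun w => !(st.2.contains w)) with hF
  have hupd : PySem.Set.update [] F = PySem.Set.ofList F := rfl
  rw [hupd]
  have htop : pvSelect arr (PySem.Set.ofList F) n
      = (pvMostCommon (PySem.Dict.counter F).items n).map (·.1) := by
    unfold pvMostCommon
    rw [PySem.Dict.items_counter,
        pvSorted_map (PySem.Set.ofList F) (fun k => (k, (F.count k : Int)))
          (fun p : String × Int => p.2)]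
    rw [← List.map_take, List.map_map]
    have hid : ((fun p : String × Int => p.1) ∘ (fun k => (k, (F.count k : Int))))
        = fun k => k := rfl
    rw [hid, List.map_id']
    rw [pvSelect_eq_take arr (PySem.Set.ofList F) n (PySem.Set.nodup_ofList F)]
    congr 1
    apply pvSorted_congr
    intro y hy
    have hyF : y ∈ F := (PySem.Set.mem_ofList F y).mp hy
    have hp : (fun w => !(st.2.contains w)) y = true := (List.mem_filter.mp hyF).2
    rw [pvCount, PySem.List.count_eq, hF,
        List.count_filter (p := fun w => !(st.2.contains w)) (a := y) (l := arr) hp]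
  rw [htop]

-- ===== VERDICT (by name: the statement is the Claim_ definition above) =====
theorem get_cluster_names_spec : Claim_equal_get_cluster_names := by
  intro clusters sentences n_words _ hpre
  unfold Spec_get_cluster_names get_cluster_names get_cluster_names_alt
  dsimp only
  have hgroup : ((clusters.zip sentences).foldl pvGroupStepA PySem.Dict.empty)
      = (clusters.zip sentences).foldl
          (fun d p => d.modify p.1 [] (· ++ pvWords p.2)) PySem.Dict.empty :=
    PySem.List.foldl_congr_mem _ _ _ _ (fun acc x _ => pvGroupA_eq_modify acc x)
  rw [hgroup]
  set pairs := clusters.zip sentences with hpairs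
  set ctl := pairs.foldl (fun d p => d.modify p.1 [] (· ++ pvWords p.2)) PySem.Dict.empty
    with hctl
  have hnd : ctl.keys.Nodup :=
    PySem.Dict.nodup_keys_foldl_modify_key pairs (fun p => p.1) []
      (fun _ p => (· ++ pvWords p.2)) PySem.Dict.empty List.nodup_nil
  have hitems : ctl.items = ctl.keys.map (fun c => (c, ctl.getD c [])) :=
    PySem.Dict.items_eq_map_keys ctl hnd []
  have hkeys : ctl.keys = pvNew [] clusters := by
    rw [hctl, PySem.Dict.keys_foldl_modify_key pairs (fun p => p.1) []
          (fun _ p => (· ++ pvWords p.2)) PySem.Dict.empty]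
    have hfst : pairs.map (fun p => p.1) = clusters := by
      rw [hpairs]
      exact List.map_fst_zip (le_of_eq hpre)
    rw [hfst]
    have : (PySem.Dict.empty : PySem.Dict Int (List String)).keys = [] := rfl
    rw [this, pvSet_update_eq_append_pvNew, List.nil_append]
  have hget : ∀ c, ctl.getD c []
      = (pairs.filter (fun p => p.1 == c)).flatMap (fun p => pvWords p.2) := by
    intro c
    rw [hctl, pvGroup_getD pairs PySem.Dict.empty c]
    rfl
  rw [hitems, hkeys,
      List.map_congr_left (fun c _ => by dsimp only; rw [hget c] :
        ∀ c ∈ pvNew [] clusters, (fun c => (c, ctl.getD c [])) c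
          = (fun c => (c, (pairs.filter (fun p => p.1 == c)).flatMap (fun p => pvWords p.2))) c),
      List.foldl_map]
  rw [pvSkip_fold clusters sentences n_words clusters []
        (PySem.Dict.empty, []) (fun c => rfl)]
  refine congrArg (fun r : PySem.Dict Int String × List String => r.1.items) ?_
  exact PySem.List.foldl_congr_mem _ _ _ _
    (fun st c _ => (pvBody_eq clusters sentences n_words st c).symm)
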